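-- pv_equiv track=rewrite | github.com/deltahdl/deltahdl | scripts/generate_lrm_subclause_dependencies/ordering.py | order_groups
-- ===== SOURCE A (Python) =====
-- from typing import Any
--
-- _Records = dict[str, dict[str, Any]]
--
-- def _adjacency(records: _Records) -> dict[str, list[str]]:
--     """Return the deps adjacency map limited to keys present in *records*."""
--     keys = set(records)
--     return {
--         sub: [d for d in records[sub]["dependencies"] if d in keys]
--         for sub in records
--     }
--
-- def order_groups(
--     groups: list[list[str]], records: _Records,
-- ) -> list[list[str]]:
--     """Sort *groups* so any group whose subclauses other groups depend on comes first.
--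
--     Tarjan already returns components in reverse-topological order
--     over the condensation (sinks first). Groups whose members no
--     other in-scope subclause depends on are foundations and must
--     move to the front; this is exactly the reverse of that order.
--     Inputs other than the Tarjan output are sorted by walking the
--     condensation explicitly.
--     """
--     adj = _adjacency(records)
--     member_to_group: dict[str, int] = {
--         member: idx for idx, group in enumerate(groups) for member in group
--     }
--     successors: dict[int, set[int]] = {idx: set() for idx in range(len(groups))}
--     for idx, group in enumerate(groups):
--         for member in group:
--             for dep in adj.get(member, []):
--                 target = member_to_group.get(dep)
--                 if target is not None and target != idx:
--                     successors[idx].add(target)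
--
--     visited: set[int] = set()
--     order: list[int] = []
--
--     def _visit(node: int) -> None:
--         if node in visited:
--             return
--         visited.add(node)
--         for nxt in sorted(successors[node]):
--             _visit(nxt)
--         order.append(node)
--
--     for idx in range(len(groups)):
--         _visit(idx)
--     return [groups[idx] for idx in order]
-- ===== SOURCE B (Python) =====
-- # Iterative explicit-stack post-order DFS instead of A's recursive _visit (same preprocessing).
-- def order_groups(groups, records):
--     keys = set(records)
--     adj = {sub: [d for d in records[sub]["dependencies"] if d in keys] for sub in records}
--     member_to_group = {m: i for i, g in enumerate(groups) for m in g}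
--     successors = {i: set() for i in range(len(groups))}
--     for i, g in enumerate(groups):
--         for m in g:
--             for dep in adj.get(m, []):
--                 t = member_to_group.get(dep)
--                 if t is not None and t != i:
--                     successors[i].add(t)
--     visited = set()
--     order = []
--     for root in range(len(groups)):
--         if root in visited:
--             continue
--         visited.add(root)
--         stack = [(root, sorted(successors[root]))]
--         while stack:
--             node, pending = stack[-1]
--             if pending:
--                 c = pending.pop(0)
--                 if c not in visited:
--                     visited.add(c)
--                     stack.append((c, sorted(successors[c])))
--             else:
--                 stack.pop()
--                 order.append(node)
--     return [groups[i] for i in order]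
-- ===== Notes on version B (the rewrite author's own statement) =====
-- stated objective: alternative
-- what changed: A's recursive _visit is replaced by an iterative explicit-stack post-order DFS (shared visited set, sorted successors pushed as pending lists), eliminating Python recursion; preprocessing is unchanged.
import Mathlib
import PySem

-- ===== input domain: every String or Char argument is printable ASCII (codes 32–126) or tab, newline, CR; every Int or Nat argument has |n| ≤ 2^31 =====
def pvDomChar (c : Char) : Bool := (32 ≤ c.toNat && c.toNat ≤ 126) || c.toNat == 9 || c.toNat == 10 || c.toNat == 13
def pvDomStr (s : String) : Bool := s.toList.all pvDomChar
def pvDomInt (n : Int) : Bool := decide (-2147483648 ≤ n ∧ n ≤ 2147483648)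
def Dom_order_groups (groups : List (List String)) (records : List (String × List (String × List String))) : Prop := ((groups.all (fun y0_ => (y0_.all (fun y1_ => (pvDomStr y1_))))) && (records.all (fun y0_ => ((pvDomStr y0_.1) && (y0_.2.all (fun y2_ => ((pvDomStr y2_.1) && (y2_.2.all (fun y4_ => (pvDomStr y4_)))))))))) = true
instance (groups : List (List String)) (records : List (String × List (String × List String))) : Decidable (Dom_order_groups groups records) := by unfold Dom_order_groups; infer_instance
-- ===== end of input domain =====

-- B replaces A's recursive _visit by an iterative explicit-stack post-order DFS (same preprocessing);
-- objective: alternative (no recursion), same asymptotic cost.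

-- ===== PORT A =====
-- Shared preprocessing (identical source text in A and B): records dict, _adjacency,
-- member_to_group, successors, and the sorted successor list of a node.

-- inner dict of one record (dict built from pairs: duplicate keys overwrite, first position kept)
def pvInner (fields : List (String × List String)) : PySem.Dict String (List String) :=
  fields.foldl (fun d kv => d.insert kv.1 kv.2) PySem.Dict.empty

def pvRecDict (records : List (String × List (String × List String))) :
    PySem.Dict String (PySem.Dict String (List String)) :=
  records.foldl (fun d kv => d.insert kv.1 (pvInner kv.2)) PySem.Dict.empty

-- _adjacency; records[sub]["dependencies"] raises KeyError when absent: the total form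
-- `.getD []` is exact only under Pre_order_groups, which excludes exactly those inputs.
def pvAdj (records : List (String × List (String × List String))) : PySem.Dict String (List String) :=
  let rd := pvRecDict records
  rd.keys.foldl
    (fun a sub =>
      a.insert sub
        (((((rd.get? sub).getD PySem.Dict.empty).get? "dependencies").getD []).filter
          (fun d => rd.contains d)))
    PySem.Dict.empty

-- member_to_group = {member: idx for idx, group in enumerate(groups) for member in group}
def pvMtg (groups : List (List String)) : PySem.Dict String Nat :=
  groups.zipIdx.foldl (fun d gi => gi.1.foldl (fun d m => d.insert m gi.2) d) PySem.Dict.empty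

-- successors: {idx: set() …} then add target group of every in-scope dep of every member
def pvSuccs (groups : List (List String)) (records : List (String × List (String × List String))) :
    PySem.Dict Nat (PySem.Set Nat) :=
  let adj := pvAdj records
  let mtg := pvMtg groups
  let init := (List.range groups.length).foldl
    (fun d i => d.insert i PySem.Set.empty) PySem.Dict.empty
  groups.zipIdx.foldl
    (fun d gi =>
      gi.1.foldl
        (fun d m =>
          (adj.getD m []).foldl
            (fun d dep =>
              match mtg.get? dep with
              | some t => if t ≠ gi.2 then d.modify gi.2 PySem.Set.empty (fun s => PySem.Set.add s t) else d
              | none => d)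
            d)
        d)
    init

-- sorted(successors[node])  (node is always a key of successors in both programs)
def pvSucc (groups : List (List String)) (records : List (String × List (String × List String)))
    (node : Nat) : List Nat :=
  PySem.List.sorted ((pvSuccs groups records).getD node PySem.Set.empty) (fun x => x) false

-- A's recursive _visit; `fuel` is a Lean-only termination budget: it is spent only when an
-- unvisited node is entered, so any fuel ≥ |unvisited nodes| computes the Python recursion exactly.
def pvVisit (succ : Nat → List Nat) (fuel : Nat) (node : Nat)
    (s : PySem.Set Nat × List Nat) : PySem.Set Nat × List Nat :=
  if PySem.Set.contains s.1 node then s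
  else
    match fuel with
    | 0 => s
    | f + 1 =>
      let s2 := (succ node).foldl (fun t c => pvVisit succ f c t) (PySem.Set.add s.1 node, s.2)
      (s2.1, s2.2 ++ [node])
termination_by fuel

def order_groups (groups : List (List String)) (records : List (String × List (String × List String))) : List (List String) :=
  let succ := pvSucc groups records
  let st := (List.range groups.length).foldl
    (fun s idx => pvVisit succ groups.length idx s) (PySem.Set.empty, [])
  st.2.map (fun i => groups.getD i [])

-- ===== PORT B =====
-- Explicit-stack DFS loop (stack top = list head); fuel is spent only on a push, so any
-- fuel ≥ |unvisited nodes| computes B's while-loop exactly.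
def pvRun (succ : Nat → List Nat) (fuel : Nat) (stack : List (Nat × List Nat))
    (s : PySem.Set Nat × List Nat) : PySem.Set Nat × List Nat :=
  match stack with
  | [] => s
  | (node, pending) :: st =>
    match pending with
    | [] => pvRun succ fuel st (s.1, s.2 ++ [node])
    | c :: rest =>
      if PySem.Set.contains s.1 c then pvRun succ fuel ((node, rest) :: st) s
      else
        match fuel with
        | 0 => s
        | f + 1 => pvRun succ f ((c, succ c) :: (node, rest) :: st) (PySem.Set.add s.1 c, s.2)
termination_by (fuel, (stack.map (fun p => p.2.length + 1)).sum)

def order_groups_alt (groups : List (List String)) (records : List (String × List (String × List String))) : List (List String) :=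
  let succ := pvSucc groups records
  let st := (List.range groups.length).foldl
    (fun s root =>
      if PySem.Set.contains s.1 root then s
      else pvRun succ groups.length [(root, succ root)] (PySem.Set.add s.1 root, s.2))
    (PySem.Set.empty, [])
  st.2.map (fun i => groups.getD i [])

-- ===== PRECONDITION & SPEC =====
-- A raises KeyError iff some key's effective record (the LAST pair with that key, as in the
-- Python dict) lacks the "dependencies" field; Pre_ excludes exactly those inputs.
def Pre_order_groups (groups : List (List String)) (records : List (String × List (String × List String))) : Prop :=
  ∀ kv ∈ records, ∃ p ∈ (((records.reverse.find? (fun q => q.1 == kv.1)).getD kv).2), p.1 = "dependencies"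
instance (groups : List (List String)) (records : List (String × List (String × List String))) : Decidable (Pre_order_groups groups records) := by unfold Pre_order_groups; infer_instance

def pvWitness_order_groups : List (List String) × (List (String × List (String × List String))) :=
  ([["a"], ["b"]], [("a", [("dependencies", ["b"])]), ("b", [("dependencies", [])])])

def Spec_order_groups (groups : List (List String)) (records : List (String × List (String × List String))) (out : List (List String)) : Prop := out = order_groups_alt groups records
instance (groups : List (List String)) (records : List (String × List (String × List String))) (out : List (List String)) : Decidable (Spec_order_groups groups records out) := by unfold Spec_order_groups; infer_instance

-- ===== CLAIM (what is proved, stated in full; the proofs are below) =====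
def Claim_equal_order_groups : Prop := ∀ (groups : List (List String)) (records : List (String × List (String × List String))), Dom_order_groups groups records → Pre_order_groups groups records → Spec_order_groups groups records (order_groups groups records)

-- ===== LEMMAS AND PROOFS =====

-- number of unvisited nodes below n
def pvBnd (n : Nat) (v : PySem.Set Nat) : Nat :=
  (List.range n).countP (fun i => !(PySem.Set.contains v i))

-- every pending list on the stack holds node indices < n
def pvStackOK (n : Nat) (st : List (Nat × List Nat)) : Prop :=
  ∀ fr ∈ st, ∀ c ∈ fr.2, c < n

-- the state a stack denotes: finish each frame in turn by A's child-fold + post-order emit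
def pvAbsorb (succ : Nat → List Nat) (g : Nat) : List (Nat × List Nat) →
    (PySem.Set Nat × List Nat) → PySem.Set Nat × List Nat
  | [], s => s
  | (node, cs) :: st, s =>
    let s2 := cs.foldl (fun t c => pvVisit succ g c t) s
    pvAbsorb succ g st (s2.1, s2.2 ++ [node])

lemma pvBnd_le (n : Nat) (v : PySem.Set Nat) : pvBnd n v ≤ n := by
  calc pvBnd n v ≤ (List.range n).length := List.countP_le_length
    _ = n := List.length_range

lemma pvBnd_mono {n : Nat} {v w : PySem.Set Nat} (h : ∀ x, x ∈ v → x ∈ w) :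
    pvBnd n w ≤ pvBnd n v := by
  refine List.countP_mono_left (fun a _ h' => ?_)
  simp only [Bool.not_eq_eq_eq_not, Bool.not_true] at *
  rcases hc : PySem.Set.contains v a with _ | _
  · rfl
  · exact absurd (h a ((PySem.Set.contains_iff v a).mp hc)) (by simpa [PySem.Set.contains_iff] using h')

lemma pvBnd_pos {n : Nat} {v : PySem.Set Nat} {node : Nat} (hn : node < n) (hv : node ∉ v) :
    0 < pvBnd n v := by
  rw [pvBnd, List.countP_pos_iff]
  refine ⟨node, List.mem_range.mpr hn, ?_⟩
  simp [hv]

lemma pvBnd_add_lt {n : Nat} {v : PySem.Set Nat} {node : Nat} (hn : node < n) (hv : node ∉ v) :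
    pvBnd n (PySem.Set.add v node) < pvBnd n v := by
  have hadd : PySem.Set.add v node = v ++ [node] := PySem.Set.add_of_not_mem hv
  obtain ⟨l1, l2, hl⟩ := List.mem_iff_append.mp (List.mem_range.mpr hn)
  have hmono : ∀ l : List Nat,
      l.countP (fun i => !(PySem.Set.contains (PySem.Set.add v node) i)) ≤
      l.countP (fun i => !(PySem.Set.contains v i)) := by
    intro l
    refine List.countP_mono_left (fun a _ h' => ?_)
    simp only [hadd, PySem.Set.contains_eq_listContains, List.contains_append,
      Bool.not_eq_true', Bool.or_eq_false_iff] at h' ⊢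
    exact h'.1
  have hnode1 : (!(PySem.Set.contains (PySem.Set.add v node) node)) = false := by
    simp [PySem.Set.mem_add]
  have hnode2 : (!(PySem.Set.contains v node)) = true := by
    simp [hv]
  rw [pvBnd, pvBnd, hl]
  simp only [List.countP_append, List.countP_cons, hnode1, hnode2, Bool.false_eq_true,
    if_false, if_true]
  have h1 := hmono l1
  have h2 := hmono l2
  omega

lemma pvVisit_of_mem {succ f node} {s : PySem.Set Nat × List Nat} (h : node ∈ s.1) :
    pvVisit succ f node s = s := by
  rw [pvVisit.eq_def]
  simp only [(PySem.Set.contains_iff s.1 node).mpr h, if_true]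

lemma pvVisit_of_not_mem {succ f node} {s : PySem.Set Nat × List Nat} (h : node ∉ s.1) :
    pvVisit succ (f + 1) node s =
      (let s2 := (succ node).foldl (fun t c => pvVisit succ f c t) (PySem.Set.add s.1 node, s.2)
       (s2.1, s2.2 ++ [node])) := by
  rw [pvVisit.eq_def]
  have hc : PySem.Set.contains s.1 node = false := by
    simpa [PySem.Set.contains_iff] using h
  simp only [hc, Bool.false_eq_true, if_false]

lemma pvVisit_subset (succ : Nat → List Nat) :
    ∀ f node (s : PySem.Set Nat × List Nat) x, x ∈ s.1 → x ∈ (pvVisit succ f node s).1 := by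
  intro f
  induction f with
  | zero =>
    intro node s x hx
    by_cases h : node ∈ s.1
    · rw [pvVisit_of_mem h]; exact hx
    · rw [pvVisit.eq_def]
      have hc : PySem.Set.contains s.1 node = false := by simpa [PySem.Set.contains_iff] using h
      simp only [hc, Bool.false_eq_true, if_false]
      exact hx
  | succ f ih =>
    intro node s x hx
    by_cases h : node ∈ s.1
    · rw [pvVisit_of_mem h]; exact hx
    · rw [pvVisit_of_not_mem h]
      simp only
      exact List.foldlRecOn (motive := fun t => x ∈ t.1) (succ node)
        (fun t c => pvVisit succ f c t) (b := (PySem.Set.add s.1 node, s.2))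
        ((PySem.Set.mem_add _ _ _).mpr (Or.inl hx))
        (fun t ht c _ => ih c t x ht)

lemma pvFold_subset (succ : Nat → List Nat) (f : Nat) (cs : List Nat)
    (s : PySem.Set Nat × List Nat) (x : Nat) (hx : x ∈ s.1) :
    x ∈ (cs.foldl (fun t c => pvVisit succ f c t) s).1 := by
  exact List.foldlRecOn (motive := fun t => x ∈ t.1) cs (fun t c => pvVisit succ f c t) (b := s) hx
    (fun t ht c _ => pvVisit_subset succ f c t x ht)

lemma pvBnd_visit_le (n : Nat) (succ : Nat → List Nat) (f node : Nat)
    (s : PySem.Set Nat × List Nat) : pvBnd n (pvVisit succ f node s).1 ≤ pvBnd n s.1 := by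
  exact pvBnd_mono (fun x hx => pvVisit_subset succ f node s x hx)

lemma pvBnd_fold_le (n : Nat) (succ : Nat → List Nat) (f : Nat) (cs : List Nat)
    (s : PySem.Set Nat × List Nat) :
    pvBnd n (cs.foldl (fun t c => pvVisit succ f c t) s).1 ≤ pvBnd n s.1 := by
  exact pvBnd_mono (fun x hx => pvFold_subset succ f cs s x hx)

-- fuel irrelevance of A's recursion: any two fuels ≥ the number of unvisited nodes agree
lemma pvVisit_irrel {n : Nat} {succ : Nat → List Nat} (hcl : ∀ x y, y ∈ succ x → y < n) :
    ∀ b f g node (s : PySem.Set Nat × List Nat), pvBnd n s.1 ≤ b → pvBnd n s.1 ≤ f →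
      pvBnd n s.1 ≤ g → node < n → pvVisit succ f node s = pvVisit succ g node s := by
  intro b
  induction b with
  | zero =>
    intro f g node s hb hf hg hn
    by_cases h : node ∈ s.1
    · rw [pvVisit_of_mem h, pvVisit_of_mem h]
    · exact absurd (pvBnd_pos hn h) (by omega)
  | succ b ih =>
    intro f g node s hb hf hg hn
    by_cases h : node ∈ s.1
    · rw [pvVisit_of_mem h, pvVisit_of_mem h]
    · have hpos : 0 < pvBnd n s.1 := pvBnd_pos hn h
      obtain ⟨f', rfl⟩ : ∃ f', f = f' + 1 := ⟨f - 1, by omega⟩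
      obtain ⟨g', rfl⟩ : ∃ g', g = g' + 1 := ⟨g - 1, by omega⟩
      rw [pvVisit_of_not_mem h, pvVisit_of_not_mem h]
      simp only
      have hlt : pvBnd n (PySem.Set.add s.1 node) < pvBnd n s.1 := pvBnd_add_lt hn h
      have key : ∀ (cs : List Nat) (s' : PySem.Set Nat × List Nat), (∀ c ∈ cs, c < n) →
          pvBnd n s'.1 ≤ b → pvBnd n s'.1 ≤ f' → pvBnd n s'.1 ≤ g' →
          cs.foldl (fun t c => pvVisit succ f' c t) s' =
          cs.foldl (fun t c => pvVisit succ g' c t) s' := by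
        intro cs
        induction cs with
        | nil => intro s' _ _ _ _; rfl
        | cons c cs' ihc =>
          intro s' hcs hb' hf' hg'
          have h1 : pvVisit succ f' c s' = pvVisit succ g' c s' :=
            ih f' g' c s' hb' hf' hg' (hcs c (by simp))
          simp only [List.foldl_cons, h1]
          have hle := pvBnd_visit_le n succ g' c s'
          exact ihc (pvVisit succ g' c s') (fun x hx => hcs x (by simp [hx]))
            (by omega) (by omega) (by omega)
      have := key (succ node) (PySem.Set.add s.1 node, s.2)
        (fun c hc => hcl node c hc) (by simp only; omega) (by simp only; omega) (by simp only; omega)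
      rw [this]

lemma pvFold_irrel {n : Nat} {succ : Nat → List Nat} (hcl : ∀ x y, y ∈ succ x → y < n)
    (f g : Nat) (cs : List Nat) (s : PySem.Set Nat × List Nat)
    (hcs : ∀ c ∈ cs, c < n) (hf : pvBnd n s.1 ≤ f) (hg : pvBnd n s.1 ≤ g) :
    cs.foldl (fun t c => pvVisit succ f c t) s = cs.foldl (fun t c => pvVisit succ g c t) s := by
  induction cs generalizing s with
  | nil => rfl
  | cons c cs' ihc =>
    have h1 : pvVisit succ f c s = pvVisit succ g c s :=
      pvVisit_irrel hcl (pvBnd n s.1) f g c s le_rfl hf hg (hcs c (by simp))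
    simp only [List.foldl_cons, h1]
    have hle := pvBnd_visit_le n succ g c s
    exact ihc (pvVisit succ g c s) (fun x hx => hcs x (by simp [hx])) (by omega) (by omega)

lemma pvAbsorb_irrel {n : Nat} {succ : Nat → List Nat} (hcl : ∀ x y, y ∈ succ x → y < n) :
    ∀ (st : List (Nat × List Nat)) f g (s : PySem.Set Nat × List Nat), pvStackOK n st →
      pvBnd n s.1 ≤ f → pvBnd n s.1 ≤ g → pvAbsorb succ f st s = pvAbsorb succ g st s := by
  intro st
  induction st with
  | nil => intro f g s _ _ _; rfl
  | cons fr st' ih =>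
    intro f g s hok hf hg
    obtain ⟨node, cs⟩ := fr
    simp only [pvAbsorb]
    have h1 : cs.foldl (fun t c => pvVisit succ f c t) s =
        cs.foldl (fun t c => pvVisit succ g c t) s :=
      pvFold_irrel hcl f g cs s (fun c hc => hok (node, cs) (by simp) c hc) hf hg
    rw [h1]
    have hle := pvBnd_fold_le n succ g cs s
    exact ih f g _ (fun fr' hfr' => hok fr' (by simp [hfr'])) (by simp only; omega) (by simp only; omega)

lemma pvRun_nil (succ : Nat → List Nat) (f : Nat) (s : PySem.Set Nat × List Nat) :
    pvRun succ f [] s = s := by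
  rw [pvRun.eq_def]

lemma pvRun_pop (succ : Nat → List Nat) (f node : Nat) (st : List (Nat × List Nat))
    (s : PySem.Set Nat × List Nat) :
    pvRun succ f ((node, []) :: st) s = pvRun succ f st (s.1, s.2 ++ [node]) := by
  rw [pvRun.eq_def]

lemma pvRun_skip {succ : Nat → List Nat} {f node c : Nat} {rest : List Nat}
    {st : List (Nat × List Nat)} {s : PySem.Set Nat × List Nat} (h : c ∈ s.1) :
    pvRun succ f ((node, c :: rest) :: st) s = pvRun succ f ((node, rest) :: st) s := by
  rw [pvRun.eq_def]
  simp only [(PySem.Set.contains_iff s.1 c).mpr h, if_true]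

lemma pvRun_push {succ : Nat → List Nat} {f node c : Nat} {rest : List Nat}
    {st : List (Nat × List Nat)} {s : PySem.Set Nat × List Nat} (h : c ∉ s.1) :
    pvRun succ (f + 1) ((node, c :: rest) :: st) s =
      pvRun succ f ((c, succ c) :: (node, rest) :: st) (PySem.Set.add s.1 c, s.2) := by
  rw [pvRun.eq_def]
  have hc : PySem.Set.contains s.1 c = false := by simpa [PySem.Set.contains_iff] using h
  simp only [hc, Bool.false_eq_true, if_false]

-- the stack machine computes what the stack denotes
lemma pvRun_absorb {n : Nat} {succ : Nat → List Nat} (hcl : ∀ x y, y ∈ succ x → y < n) :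
    ∀ b t f g (st : List (Nat × List Nat)) (s : PySem.Set Nat × List Nat),
      (st.map (fun p => p.2.length + 1)).sum ≤ t → pvStackOK n st →
      pvBnd n s.1 ≤ b → pvBnd n s.1 ≤ f → pvBnd n s.1 ≤ g →
      pvRun succ f st s = pvAbsorb succ g st s := by
  intro b
  induction b with
  | zero =>
    intro t f g st s htot hok hb hf hg
    induction t generalizing f g st s with
    | zero =>
      cases st with
      | nil => rw [pvRun_nil, pvAbsorb]
      | cons fr st' => simp [List.map_cons] at htot
    | succ t iht =>
      cases st with
      | nil => rw [pvRun_nil, pvAbsorb]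
      | cons fr st' =>
        obtain ⟨node, pending⟩ := fr
        cases pending with
        | nil =>
          rw [pvRun_pop]
          have h2 : pvAbsorb succ g ((node, []) :: st') s = pvAbsorb succ g st' (s.1, s.2 ++ [node]) := by
            simp only [pvAbsorb, List.foldl_nil]
          rw [h2]
          exact iht f g st' _ (by simp [List.map_cons] at htot ⊢; omega)
            (fun fr' hfr' => hok fr' (by simp [hfr'])) hb hf hg
        | cons c rest =>
          by_cases hc : c ∈ s.1
          · rw [pvRun_skip hc]
            have h2 : pvAbsorb succ g ((node, c :: rest) :: st') s =
                pvAbsorb succ g ((node, rest) :: st') s := by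
              simp only [pvAbsorb, List.foldl_cons, pvVisit_of_mem hc]
            rw [h2]
            refine iht f g ((node, rest) :: st') s ?_ ?_ hb hf hg
            · simp [List.map_cons] at htot ⊢; omega
            · intro fr' hfr' x hx
              rcases List.mem_cons.mp hfr' with h' | h'
              · rw [h'] at hx
                exact hok (node, c :: rest) (by simp) x (List.mem_cons_of_mem _ hx)
              · exact hok fr' (by simp [h']) x hx
          · have hcn : c < n := hok (node, c :: rest) (by simp) c (by simp)
            exact absurd (pvBnd_pos hcn hc) (by omega)
  | succ b ihb =>
    intro t f g st s htot hok hb hf hg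
    induction t generalizing f g st s with
    | zero =>
      cases st with
      | nil => rw [pvRun_nil, pvAbsorb]
      | cons fr st' => simp [List.map_cons] at htot
    | succ t iht =>
      cases st with
      | nil => rw [pvRun_nil, pvAbsorb]
      | cons fr st' =>
        obtain ⟨node, pending⟩ := fr
        cases pending with
        | nil =>
          rw [pvRun_pop]
          have h2 : pvAbsorb succ g ((node, []) :: st') s = pvAbsorb succ g st' (s.1, s.2 ++ [node]) := by
            simp only [pvAbsorb, List.foldl_nil]
          rw [h2]
          exact iht f g st' _ (by simp [List.map_cons] at htot ⊢; omega)
            (fun fr' hfr' => hok fr' (by simp [hfr'])) hb hf hg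
        | cons c rest =>
          by_cases hc : c ∈ s.1
          · rw [pvRun_skip hc]
            have h2 : pvAbsorb succ g ((node, c :: rest) :: st') s =
                pvAbsorb succ g ((node, rest) :: st') s := by
              simp only [pvAbsorb, List.foldl_cons, pvVisit_of_mem hc]
            rw [h2]
            refine iht f g ((node, rest) :: st') s ?_ ?_ hb hf hg
            · simp [List.map_cons] at htot ⊢; omega
            · intro fr' hfr' x hx
              rcases List.mem_cons.mp hfr' with h' | h'
              · rw [h'] at hx
                exact hok (node, c :: rest) (by simp) x (List.mem_cons_of_mem _ hx)
              · exact hok fr' (by simp [h']) x hx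
          · have hcn : c < n := hok (node, c :: rest) (by simp) c (by simp)
            have hpos : 0 < pvBnd n s.1 := pvBnd_pos hcn hc
            obtain ⟨f', rfl⟩ : ∃ f', f = f' + 1 := ⟨f - 1, by omega⟩
            obtain ⟨g', rfl⟩ : ∃ g', g = g' + 1 := ⟨g - 1, by omega⟩
            rw [pvRun_push hc]
            have hlt : pvBnd n (PySem.Set.add s.1 c) < pvBnd n s.1 := pvBnd_add_lt hcn hc
            have hok2 : pvStackOK n ((c, succ c) :: (node, rest) :: st') := by
              intro fr' hfr' x hx
              rcases List.mem_cons.mp hfr' with h' | h'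
              · rw [h'] at hx
                exact hcl c x hx
              · rcases List.mem_cons.mp h' with h'' | h''
                · exact hok (node, c :: rest) (by simp) x (by rw [h''] at hx; simp [hx])
                · exact hok fr' (by simp [h'']) x hx
            have h1 := ihb ((((c, succ c) :: (node, rest) :: st').map (fun p => p.2.length + 1)).sum)
              f' g' ((c, succ c) :: (node, rest) :: st') (PySem.Set.add s.1 c, s.2)
              le_rfl hok2 (by simp only; omega) (by simp only; omega) (by simp only; omega)
            rw [h1]
            have h2 : pvAbsorb succ g' ((c, succ c) :: (node, rest) :: st') (PySem.Set.add s.1 c, s.2) =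
                pvAbsorb succ g' ((node, rest) :: st') (pvVisit succ (g' + 1) c s) := by
              rw [pvVisit_of_not_mem hc]
              simp only [pvAbsorb]
            rw [h2]
            have hvle : pvBnd n (pvVisit succ (g' + 1) c s).1 ≤ g' := by
              have h3 := pvBnd_visit_le n succ (g' + 1) c s
              have h4 : pvBnd n (pvVisit succ (g' + 1) c s).1 ≤ pvBnd n (PySem.Set.add s.1 c) := by
                rw [pvVisit_of_not_mem hc]
                simp only
                exact pvBnd_fold_le n succ g' (succ c) (PySem.Set.add s.1 c, s.2)
              omega
            have h5 : pvAbsorb succ g' ((node, rest) :: st') (pvVisit succ (g' + 1) c s) =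
                pvAbsorb succ (g' + 1) ((node, rest) :: st') (pvVisit succ (g' + 1) c s) := by
              refine pvAbsorb_irrel hcl _ g' (g' + 1) _ ?_ hvle (by omega)
              intro fr' hfr' x hx
              rcases List.mem_cons.mp hfr' with h' | h'
              · exact hok (node, c :: rest) (by simp) x (by rw [h'] at hx; simp [hx])
              · exact hok fr' (by simp [h']) x hx
            rw [h5]
            have h6 : pvAbsorb succ (g' + 1) ((node, c :: rest) :: st') s =
                pvAbsorb succ (g' + 1) ((node, rest) :: st') (pvVisit succ (g' + 1) c s) := by
              simp only [pvAbsorb, List.foldl_cons]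
            rw [h6]

-- one outer-loop step of A equals one outer-loop step of B
lemma pvStep_eq {n : Nat} {succ : Nat → List Nat} (hcl : ∀ x y, y ∈ succ x → y < n)
    (idx : Nat) (hidx : idx < n) (s : PySem.Set Nat × List Nat) :
    pvVisit succ n idx s =
      (if PySem.Set.contains s.1 idx then s
       else pvRun succ n [(idx, succ idx)] (PySem.Set.add s.1 idx, s.2)) := by
  by_cases hmem : idx ∈ s.1
  · rw [pvVisit_of_mem hmem, if_pos ((PySem.Set.contains_iff _ _).mpr hmem)]
  · have hcf : PySem.Set.contains s.1 idx = false := by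
      simpa [PySem.Set.contains_iff] using hmem
    rw [if_neg (by simp [hmem])]
    have hpos : 0 < pvBnd n s.1 := pvBnd_pos hidx hmem
    have hn1 : 0 < n := lt_of_le_of_lt (Nat.zero_le _) (lt_of_lt_of_le hpos (pvBnd_le n s.1))
    have hlt : pvBnd n (PySem.Set.add s.1 idx) < pvBnd n s.1 := pvBnd_add_lt hidx hmem
    have hble := pvBnd_le n s.1
    obtain ⟨m, rfl⟩ : ∃ m, n = m + 1 := ⟨n - 1, by omega⟩
    rw [pvVisit_of_not_mem hmem]
    simp only
    have hok : pvStackOK (m + 1) [(idx, succ idx)] := by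
      intro fr hfr x hx
      rcases List.mem_cons.mp hfr with h' | h'
      · rw [h'] at hx; exact hcl idx x hx
      · cases h'
    have h1 := pvRun_absorb hcl (pvBnd (m + 1) (PySem.Set.add s.1 idx))
      (([(idx, succ idx)].map (fun p : Nat × List Nat => p.2.length + 1)).sum)
      (m + 1) m [(idx, succ idx)] (PySem.Set.add s.1 idx, s.2)
      le_rfl hok (by simp only; omega) (by simp only; omega) (by simp only; omega)
    rw [h1]
    simp only [pvAbsorb]

lemma pvLoop_eq {n : Nat} {succ : Nat → List Nat} (hcl : ∀ x y, y ∈ succ x → y < n) :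
    ∀ (l : List Nat), (∀ i ∈ l, i < n) → ∀ (s : PySem.Set Nat × List Nat),
      l.foldl (fun s idx => pvVisit succ n idx s) s =
      l.foldl (fun s root =>
        if PySem.Set.contains s.1 root then s
        else pvRun succ n [(root, succ root)] (PySem.Set.add s.1 root, s.2)) s := by
  intro l
  induction l with
  | nil => intro _ s; rfl
  | cons i l' ih =>
    intro hl s
    simp only [List.foldl_cons]
    rw [pvStep_eq hcl i (hl i (by simp)) s]
    exact ih (fun j hj => hl j (by simp [hj])) _

lemma pvMtg_lt (groups : List (List String)) :
    ∀ k t, (pvMtg groups).get? k = some t → t < groups.length := by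
  unfold pvMtg
  refine List.foldlRecOn (motive := fun d => ∀ k t, d.get? k = some t → t < groups.length)
    groups.zipIdx _ (b := (PySem.Dict.empty : PySem.Dict String Nat)) ?_ ?_
  · intro k t h
    simp [PySem.Dict.get?_empty] at h
  · intro d hd gi hgi
    have hlt : gi.2 < groups.length := by
      obtain ⟨x, i⟩ := gi
      have := List.mk_mem_zipIdx_iff_getElem?.mp hgi
      simpa using (List.getElem?_eq_some_iff.mp this).1
    refine List.foldlRecOn (motive := fun d => ∀ k t, d.get? k = some t → t < groups.length)
      gi.1 _ (b := d) hd ?_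
    intro d' hd' m _ k t ht
    rw [PySem.Dict.get?_insert] at ht
    by_cases hk : k = m
    · rw [if_pos hk] at ht
      cases ht
      exact hlt
    · rw [if_neg hk] at ht
      exact hd' k t ht

lemma pvSucc_lt (groups : List (List String)) (records : List (String × List (String × List String))) :
    ∀ x y, y ∈ pvSucc groups records x → y < groups.length := by
  intro x y hy
  have hy' : y ∈ (pvSuccs groups records).getD x PySem.Set.empty :=
    (PySem.List.mem_sorted _ _ _ _).mp hy
  suffices H : ∀ i z, z ∈ ((pvSuccs groups records).getD i PySem.Set.empty) → z < groups.length by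
    exact H x y hy'
  unfold pvSuccs
  dsimp only
  refine List.foldlRecOn
    (motive := fun d => ∀ i z, z ∈ d.getD i PySem.Set.empty → z < groups.length)
    groups.zipIdx _
    (b := (List.range groups.length).foldl (fun d i => d.insert i PySem.Set.empty) PySem.Dict.empty)
    ?_ ?_
  · -- the initial dict {idx: set()} has only empty values
    refine List.foldlRecOn
      (motive := fun d => ∀ i z, z ∈ d.getD i PySem.Set.empty → z < groups.length)
      (List.range groups.length) _ (b := (PySem.Dict.empty : PySem.Dict Nat (PySem.Set Nat))) ?_ ?_
    · intro i z hz
      rw [PySem.Dict.getD_empty] at hz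
      cases hz
    · intro d hd j _ i z hz
      rw [PySem.Dict.getD_insert] at hz
      by_cases hij : i = j
      · rw [if_pos hij] at hz
        cases hz
      · rw [if_neg hij] at hz
        exact hd i z hz
  · intro d hd gi _
    refine List.foldlRecOn
      (motive := fun d => ∀ i z, z ∈ d.getD i PySem.Set.empty → z < groups.length)
      gi.1 _ (b := d) hd ?_
    intro d' hd' m _
    refine List.foldlRecOn
      (motive := fun d => ∀ i z, z ∈ d.getD i PySem.Set.empty → z < groups.length)
      ((pvAdj records).getD m []) _ (b := d') hd' ?_
    intro d'' hd'' dep _ i z hz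
    rcases hmg : (pvMtg groups).get? dep with _ | t
    · rw [hmg] at hz
      dsimp only at hz
      exact hd'' i z hz
    · rw [hmg] at hz
      dsimp only at hz
      by_cases hne : t ≠ gi.2
      · rw [if_pos hne] at hz
        rw [PySem.Dict.getD_modify] at hz
        by_cases hig : i = gi.2
        · rw [if_pos hig] at hz
          rcases (PySem.Set.mem_add _ _ _).mp hz with h' | h'
          · exact hd'' gi.2 z h'
          · rw [h']
            exact pvMtg_lt groups dep t hmg
        · rw [if_neg hig] at hz
          exact hd'' i z hz
      · rw [if_neg hne] at hz
        exact hd'' i z hz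

-- ===== VERDICT (by name: the statement is the Claim_ definition above) =====
theorem order_groups_spec : Claim_equal_order_groups := by
  intro groups records _ _
  unfold Spec_order_groups order_groups order_groups_alt
  dsimp only
  have h := pvLoop_eq (n := groups.length) (succ := pvSucc groups records)
    (pvSucc_lt groups records) (List.range groups.length)
    (fun i hi => List.mem_range.mp hi) (PySem.Set.empty, [])
  rw [h]
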